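-- pv_equiv track=rewrite | github.com/Javier-Sinuka/folclore_popurri | fetch_lyrics_ovh.py | replace_placeholder_blocks
-- ===== SOURCE A (Python) =====
-- PLACEHOLDER = "_Espacio para la letra._"
--
-- def replace_placeholder_blocks(text: str, lyrics_by_title: dict[str, str]) -> str:
--     lines = text.splitlines()
--     current_title: str | None = None
--     out: list[str] = []
--
--     for line in lines:
--         if line.startswith("## "):
--             current_title = line[3:].strip()
--             out.append(line)
--             continue
--
--         if line == PLACEHOLDER and current_title in lyrics_by_title:
--             out.append(lyrics_by_title[current_title])
--             continue
--
--         out.append(line)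
--
--     return "\n".join(out) + "\n"
-- ===== SOURCE B (Python) =====
-- PLACEHOLDER = "_Espacio para la letra._"
--
-- def replace_placeholder_blocks(text: str, lyrics_by_title: dict[str, str]) -> str:
--     lines = text.splitlines()
--     n = len(lines)
--     out: list[str] = []
--     # preamble: everything before the first heading is copied verbatim
--     i = 0
--     while i < n and not lines[i].startswith("## "):
--         out.append(lines[i])
--         i += 1
--     # then a sequence of sections: a heading line followed by its body span
--     while i < n:
--         head = lines[i]
--         out.append(head)
--         title = head[3:].strip()
--         i += 1
--         start = i
--         while i < n and not lines[i].startswith("## "):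
--             i += 1
--         body = lines[start:i]
--         if title in lyrics_by_title:
--             lyric = lyrics_by_title[title]
--             body = [lyric if b == PLACEHOLDER else b for b in body]
--         out.extend(body)
--     return "\n".join(out) + "\n"
-- ===== Notes on version B (the rewrite author's own statement) =====
-- stated objective: alternative
-- what changed: B splits the text into a preamble plus (heading, body-span) sections and maps placeholders per section, instead of A's single line-by-line scan threading a current_title state variable.
import Mathlib
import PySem

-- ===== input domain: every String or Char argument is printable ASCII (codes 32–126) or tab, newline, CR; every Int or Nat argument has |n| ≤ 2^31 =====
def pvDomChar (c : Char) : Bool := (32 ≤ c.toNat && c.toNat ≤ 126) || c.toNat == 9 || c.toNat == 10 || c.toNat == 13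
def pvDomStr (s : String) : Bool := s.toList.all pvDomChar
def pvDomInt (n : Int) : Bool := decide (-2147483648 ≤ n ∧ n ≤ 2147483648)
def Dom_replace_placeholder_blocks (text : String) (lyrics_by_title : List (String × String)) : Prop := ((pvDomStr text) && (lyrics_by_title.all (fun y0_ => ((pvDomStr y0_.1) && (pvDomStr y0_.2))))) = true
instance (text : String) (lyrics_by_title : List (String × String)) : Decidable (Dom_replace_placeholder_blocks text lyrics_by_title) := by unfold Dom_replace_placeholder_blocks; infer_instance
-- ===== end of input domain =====

-- B replaces A's stateful line scan with a section (span) decomposition; same results, alternative structure.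
-- ===== PORT A =====
def pvPlaceholder : String := "_Espacio para la letra._"

def pvLookup (lyr : List (String × String)) (k : String) : Option String :=
  (lyr.find? (fun p => p.1 == k)).map (·.2)

-- A's loop: state = (current_title, out), one line at a time
def pvGoA (lyr : List (String × String)) : Option String → List String → List String → List String
  | _, out, [] => out
  | title?, out, line :: rest =>
    if PySem.Str.startswith line "## " then
      pvGoA lyr (some (PySem.Str.strip (PySem.Str.slice line (some 3) none))) (out ++ [line]) rest
    else if line == pvPlaceholder && (title?.bind (pvLookup lyr)).isSome then
      pvGoA lyr title? (out ++ [(title?.bind (pvLookup lyr)).getD ""]) rest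
    else
      pvGoA lyr title? (out ++ [line]) rest

def replace_placeholder_blocks (text : String) (lyrics_by_title : List (String × String)) : String :=
  PySem.Str.join "\n" (pvGoA lyrics_by_title none [] (PySem.Str.splitlines text)) ++ "\n"

-- ===== PORT B =====
def pvNotHead (l : String) : Bool := !PySem.Str.startswith l "## "

def pvMapBody (lyr? : Option String) (body : List String) : List String :=
  match lyr? with
  | some v => body.map (fun b => if b == pvPlaceholder then v else b)
  | none => body

-- B's second loop: each call consumes one heading plus its body span
def pvSections (lyr : List (String × String)) : List String → List String
  | [] => []
  | head :: rest =>
    head :: (pvMapBody (pvLookup lyr (PySem.Str.strip (PySem.Str.slice head (some 3) none)))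
               (rest.takeWhile pvNotHead)
             ++ pvSections lyr (rest.dropWhile pvNotHead))
termination_by lines => lines.length
decreasing_by
  have := List.length_dropWhile_le pvNotHead rest
  simp; omega

def replace_placeholder_blocks_alt (text : String) (lyrics_by_title : List (String × String)) : String :=
  let lines := PySem.Str.splitlines text
  PySem.Str.join "\n"
    (lines.takeWhile pvNotHead ++ pvSections lyrics_by_title (lines.dropWhile pvNotHead)) ++ "\n"

-- ===== PRECONDITION & SPEC =====
def Spec_replace_placeholder_blocks (text : String) (lyrics_by_title : List (String × String)) (out : String) : Prop := out = replace_placeholder_blocks_alt text lyrics_by_title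
instance (text : String) (lyrics_by_title : List (String × String)) (out : String) : Decidable (Spec_replace_placeholder_blocks text lyrics_by_title out) := by unfold Spec_replace_placeholder_blocks; infer_instance

-- ===== CLAIM (what is proved, stated in full; the proofs are below) =====
def Claim_equal_replace_placeholder_blocks : Prop := ∀ (text : String) (lyrics_by_title : List (String × String)), Dom_replace_placeholder_blocks text lyrics_by_title → Spec_replace_placeholder_blocks text lyrics_by_title (replace_placeholder_blocks text lyrics_by_title)

-- ===== LEMMAS AND PROOFS =====
lemma pvMapBody_cons (o : Option String) (line : String) (tw : List String) :
    pvMapBody o (line :: tw)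
      = (if line == pvPlaceholder && o.isSome then o.getD "" else line) :: pvMapBody o tw := by
  cases o with
  | none => simp [pvMapBody]
  | some v => by_cases h : line = pvPlaceholder <;> simp [pvMapBody, h]

lemma pvGoA_eq (lyr : List (String × String)) :
    ∀ (lines : List String) (title? : Option String) (out : List String),
      pvGoA lyr title? out lines
        = out ++ pvMapBody (title?.bind (pvLookup lyr)) (lines.takeWhile pvNotHead)
              ++ pvSections lyr (lines.dropWhile pvNotHead) := by
  intro lines
  induction lines with
  | nil => intro title? out; cases title?.bind (pvLookup lyr) <;> simp [pvGoA, pvMapBody, pvSections]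
  | cons line rest ih =>
    intro title? out
    by_cases hh : PySem.Str.startswith line "## "
    · have hnh : pvNotHead line = false := by simp only [pvNotHead, hh, Bool.not_true]
      simp only [pvGoA, hh, if_pos, List.takeWhile_cons, List.dropWhile_cons, hnh]
      rw [ih]
      cases htb : title?.bind (pvLookup lyr) <;>
        simp [pvSections, pvMapBody, List.append_assoc]
    · have hh' : PySem.Str.startswith line "## " = false := by
        simpa using hh
      have hnh : pvNotHead line = true := by simp only [pvNotHead, hh', Bool.not_false]
      simp only [pvGoA, hh', List.takeWhile_cons, List.dropWhile_cons, hnh, if_true,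
        Bool.false_eq_true, if_false, pvMapBody_cons]
      simp only [ih]
      by_cases hc : (line == pvPlaceholder && (title?.bind (pvLookup lyr)).isSome) = true
      · simp [hc, List.append_assoc]
      · have hc' : (line == pvPlaceholder && (title?.bind (pvLookup lyr)).isSome) = false := by
          simpa using hc
        simp [hc', List.append_assoc]

-- ===== VERDICT (by name: the statement is the Claim_ definition above) =====
theorem replace_placeholder_blocks_spec : Claim_equal_replace_placeholder_blocks := by
  intro text lyr _
  unfold Spec_replace_placeholder_blocks replace_placeholder_blocks replace_placeholder_blocks_alt
  rw [pvGoA_eq]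
  simp [pvMapBody]
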